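-- pv_equiv track=rewrite | github.com/5nam/Algorithm | stack/11.py | solution
-- ===== SOURCE A (Python) =====
-- def solution(S):
--     s_list = list(S)
--     stack = [s_list[0]]
--     n = len(s_list)
--
--     for i in range(1, n):
--         if stack and stack[-1] == s_list[i]:
--             stack.pop()
--
--         else:
--             stack.append(s_list[i])
--
--     if stack:
--         return 0
--
--     return 1
-- ===== SOURCE B (Python) =====
-- def solution(S):
--     # Rewrite-to-fixpoint: repeatedly delete adjacent equal pairs until a
--     # full pass changes nothing; fully cancelled iff nothing is left.
--     s = list(S)
--     while True:
--         t = []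
--         i = 0
--         while i < len(s):
--             if i + 1 < len(s) and s[i] == s[i + 1]:
--                 i += 2
--             else:
--                 t.append(s[i])
--                 i += 1
--         if t == s:
--             break
--         s = t
--     return 1 if not s else 0
-- ===== Notes on version B (the rewrite author's own statement) =====
-- stated objective: alternative
-- what changed: B repeatedly scans the string deleting adjacent equal pairs until a fixpoint (rewrite-to-normal-form) instead of A's single left-to-right stack pass; equivalence rests on the pass preserving the stack normal form.
-- outside the precondition, e.g. on solution(''): A raises IndexError, B returns 1
-- crash fix: On the empty string A raises IndexError (it reads S[0] unconditionally) while B returns 1, the natural answer for a fully cancelled string. — e.g. on solution(""): A raises IndexError, B returns 1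
import Mathlib
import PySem

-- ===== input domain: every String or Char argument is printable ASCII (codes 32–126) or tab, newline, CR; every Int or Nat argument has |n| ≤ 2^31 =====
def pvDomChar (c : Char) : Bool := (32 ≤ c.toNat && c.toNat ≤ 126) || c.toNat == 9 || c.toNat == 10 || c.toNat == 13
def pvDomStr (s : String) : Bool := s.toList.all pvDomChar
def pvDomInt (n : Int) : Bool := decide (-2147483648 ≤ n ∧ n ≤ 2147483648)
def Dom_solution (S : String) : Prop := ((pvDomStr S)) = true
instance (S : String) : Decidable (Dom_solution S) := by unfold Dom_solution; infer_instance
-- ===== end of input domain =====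

-- B replaces A's single stack pass by repeated deletion of adjacent equal pairs to a fixpoint
-- (alternative algorithm, not faster); return values proved equal on nonempty strings.

-- ===== PORT A =====
-- one loop step of A: Python 'if stack and stack[-1] == s[i]: pop else append'
-- (stack modelled with its top at the head)
def stepA (st : List Char) (c : Char) : List Char :=
  match st with
  | [] => [c]
  | t :: ts => if t = c then ts else c :: t :: ts

def solution (S : String) : Int :=
  match S.toList with
  | [] => 0          -- A raises IndexError here (reads S[0]); excluded by Pre_solution
  | c :: rest =>
      let stack := rest.foldl stepA [c]
      if stack ≠ [] then 0 else 1

-- ===== PORT B =====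
-- one full scan of B's inner while-loop: delete each adjacent equal pair met
def pass1 : List Char → List Char
  | [] => []
  | [a] => [a]
  | a :: b :: rest => if a = b then pass1 rest else a :: pass1 (b :: rest)

theorem pass1_length_le : ∀ l : List Char, (pass1 l).length ≤ l.length := by
  intro l
  fun_induction pass1 l with
  | case1 => simp
  | case2 => simp
  | case3 a rest ih => simp only [List.length_cons]; omega
  | case4 a b rest h ih => simp only [List.length_cons] at ih ⊢; omega

theorem pass1_ne_length_lt : ∀ l : List Char, pass1 l ≠ l → (pass1 l).length < l.length := by
  intro l
  fun_induction pass1 l with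
  | case1 => simp
  | case2 a => simp
  | case3 a rest ih =>
      intro _
      have := pass1_length_le rest
      simp only [List.length_cons]; omega
  | case4 a b rest h ih =>
      intro hne
      have hsub : pass1 (b :: rest) ≠ b :: rest := by
        intro he; exact hne (by rw [he])
      have := ih hsub
      simp only [List.length_cons] at this ⊢; omega

-- B's outer while-loop: iterate pass1 to a fixpoint
def passFix (l : List Char) : List Char :=
  if h : pass1 l = l then l else passFix (pass1 l)
termination_by l.length
decreasing_by exact pass1_ne_length_lt l h

def solution_alt (S : String) : Int :=
  if passFix S.toList = [] then 1 else 0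

-- ===== PRECONDITION & SPEC =====
-- Pre_ excludes only the empty string, on which A raises IndexError (S[0]).
def Pre_solution (S : String) : Prop := S ≠ ""
instance (S : String) : Decidable (Pre_solution S) := by unfold Pre_solution; infer_instance
def pvWitness_solution : String := "abba"

-- On the empty string A raises IndexError while B returns 1, the natural answer for a fully cancelled string.
def Raises_solution (S : String) : Prop := S = ""
instance (S : String) : Decidable (Raises_solution S) := by unfold Raises_solution; infer_instance
def pvRaiseWitness_solution : String := ""
def pvRaiseWitnessOut_solution : Int := 1

def Spec_solution (S : String) (out : Int) : Prop := out = solution_alt S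
instance (S : String) (out : Int) : Decidable (Spec_solution S out) := by unfold Spec_solution; infer_instance

-- ===== CLAIM (what is proved, stated in full; the proofs are below) =====
def Claim_equal_solution : Prop := ∀ (S : String), Dom_solution S → Pre_solution S → Spec_solution S (solution S)
def Claim_raises_solution : Prop := (∀ (S : String), Dom_solution S → Raises_solution S → ¬ Pre_solution S) ∧ (Dom_solution (pvRaiseWitness_solution) ∧ Raises_solution (pvRaiseWitness_solution) ∧ solution_alt (pvRaiseWitness_solution) = pvRaiseWitnessOut_solution)

-- ===== LEMMAS AND PROOFS =====

-- A's stack never holds two equal adjacent elements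
theorem noAdj_stepA {st : List Char} (c : Char)
    (h : List.IsChain (· ≠ ·) st) : List.IsChain (· ≠ ·) (stepA st c) := by
  match st with
  | [] => simp [stepA]
  | t :: ts =>
      simp only [stepA]
      split_ifs with he
      · exact (List.isChain_cons.mp h).2
      · exact List.isChain_cons.mpr ⟨by simp [Ne.symm he], h⟩

-- two equal consecutive characters leave a duplicate-free stack unchanged
theorem stepA_pair {st : List Char} (a : Char)
    (h : List.IsChain (· ≠ ·) st) : stepA (stepA st a) a = st := by
  match st with
  | [] => simp [stepA]
  | t :: ts =>
      simp only [stepA]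
      split_ifs with he
      · subst he
        match ts with
        | [] => simp [stepA]
        | u :: us =>
            have htu : t ≠ u := by
              have := (List.isChain_cons.mp h).1
              simpa using this
            simp [stepA, Ne.symm htu]
      · simp [stepA]

-- one B-pass does not change A's stack result
theorem foldl_pass1 : ∀ (l st : List Char),
    List.IsChain (· ≠ ·) st → (pass1 l).foldl stepA st = l.foldl stepA st := by
  intro l
  fun_induction pass1 l with
  | case1 => intro st _; rfl
  | case2 a => intro st _; rfl
  | case3 a rest ih =>
      intro st hst
      rw [ih st hst]
      simp only [List.foldl_cons]
      rw [stepA_pair a hst]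
  | case4 a b rest h ih =>
      intro st hst
      simp only [List.foldl_cons]
      exact ih (stepA st a) (noAdj_stepA a hst)

-- a fixpoint of pass1 has no adjacent equal pair
theorem pass1_fix_noAdj : ∀ l : List Char, pass1 l = l → List.IsChain (· ≠ ·) l := by
  intro l
  fun_induction pass1 l with
  | case1 => intro _; simp
  | case2 a => intro _; simp
  | case3 a rest ih =>
      intro hfix
      exfalso
      have hle := pass1_length_le rest
      have : (pass1 rest).length = rest.length + 2 := by rw [hfix]; simp
      omega
  | case4 a b rest h ih =>
      intro hfix
      simp only [List.cons.injEq, true_and] at hfix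
      exact List.isChain_cons.mpr ⟨by simp [h], ih hfix⟩

-- on a duplicate-free tail, A's stack just accumulates the characters in reverse
theorem foldl_noAdj : ∀ (l st : List Char),
    List.IsChain (· ≠ ·) (st.reverse ++ l) → l.foldl stepA st = l.reverse ++ st := by
  intro l
  induction l with
  | nil => intro st _; simp
  | cons c l' ih =>
      intro st hchain
      have hstep : stepA st c = c :: st := by
        match st with
        | [] => rfl
        | t :: ts =>
            have hmem : t ≠ c := by
              rw [List.isChain_append] at hchain
              have hlast : ((t :: ts).reverse).getLast? = some t := by
                rw [List.getLast?_reverse]; rfl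
              exact hchain.2.2 t hlast c (by simp)
            simp [stepA, hmem]
      simp only [List.foldl_cons, hstep]
      rw [ih (c :: st) (by simpa using hchain)]
      simp

-- iterating pass1 does not change A's stack result either
theorem foldl_passFix : ∀ (l : List Char),
    (passFix l).foldl stepA ([] : List Char) = l.foldl stepA [] := by
  intro l
  fun_induction passFix l with
  | case1 l h => rfl
  | case2 l h ih => rw [ih, foldl_pass1 l [] (by simp)]

theorem passFix_fix : ∀ l : List Char, pass1 (passFix l) = passFix l := by
  intro l
  fun_induction passFix l with
  | case1 l h => exact h
  | case2 l h ih => exact ih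

theorem stack_eq_rev (l : List Char) : l.foldl stepA ([] : List Char) = (passFix l).reverse := by
  rw [← foldl_passFix l]
  have hna := pass1_fix_noAdj _ (passFix_fix l)
  have := foldl_noAdj (passFix l) []
  simpa using this (by simpa using hna)

theorem toList_ne_nil (S : String) (h : S ≠ "") : S.toList ≠ [] := by
  intro he
  apply h
  have := congrArg String.ofList he
  simpa using this

-- ===== VERDICT (by name: the statement is the Claim_ definition above) =====
theorem solution_spec : Claim_equal_solution := by
  intro S _hdom hpre
  unfold Spec_solution solution solution_alt
  match hl : S.toList with
  | [] => exact absurd hl (toList_ne_nil S hpre)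
  | c :: rest =>
      simp only
      have hstack : rest.foldl stepA [c] = (passFix (c :: rest)).reverse := by
        have h0 : (c :: rest).foldl stepA ([] : List Char) = rest.foldl stepA [c] := by
          simp [List.foldl_cons, stepA]
        rw [← h0, stack_eq_rev]
      rw [hstack]
      by_cases hfe : passFix (c :: rest) = []
      · simp [hfe]
      · simp [hfe, List.reverse_eq_nil_iff]

theorem solution_raises : Claim_raises_solution := by
  unfold Claim_raises_solution
  refine ⟨fun S _ hr hp => hp hr, by decide, rfl, ?_⟩
  show (if passFix "".toList = [] then (1 : Int) else 0) = 1
  rw [show ("".toList : List Char) = [] from rfl, passFix]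
  simp [pass1]

-- self-check: pvWitness_solution lies in Dom and Pre, and the raise witness in Raises_ (via solution_raises)
theorem witness_selfcheck :
    Dom_solution pvWitness_solution ∧ Pre_solution pvWitness_solution ∧ Raises_solution pvRaiseWitness_solution :=
  ⟨by decide, by decide, solution_raises.2.2.1⟩
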